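-- pv_equiv track=rewrite | github.com/EmanuelSal/Atividades_Programacao-1 | questões_tst/blefe/blefe.py | blefe
-- ===== SOURCE A (Python) =====
-- def blefe(lista1):
--     lista = []
--
--     for valor in range(len(lista1)):
--         if valor != 0:
--             if lista1[valor] > lista1[valor -1]:
--                 lista.append(lista1[valor] - lista1[valor - 1])
--                 lista1[valor] = lista1[valor - 1]
--
--             else:
--                 lista.append(0)
--         else:
--             lista.append(0)
--
--     return lista
-- ===== SOURCE B (Python) =====
-- def blefe(lista1):
--     if not lista1:
--         return []
--     # pass 1: prefix-minimum table of the original values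
--     runmin = []
--     m = lista1[0]
--     for v in lista1:
--         m = min(m, v)
--         runmin.append(m)
--     # pass 2: positive differences against the prefix minimum, reading still-original values
--     out = [0] + [max(0, lista1[i] - runmin[i - 1]) for i in range(1, len(lista1))]
--     # reproduce A's in-place clamping side effect (only after the reads)
--     lista1[:] = runmin
--     return out
-- ===== Notes on version B (the rewrite author's own statement) =====
-- stated objective: alternative
-- what changed: A does one index loop whose comparisons read values it has already clamped in place; B first builds an explicit prefix-minimum table in one pass, then in a second pass emits max(0, original[i] - runmin[i-1]), applying the in-place clamp (lista1[:] = runmin) only afterwards.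
import Mathlib
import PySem

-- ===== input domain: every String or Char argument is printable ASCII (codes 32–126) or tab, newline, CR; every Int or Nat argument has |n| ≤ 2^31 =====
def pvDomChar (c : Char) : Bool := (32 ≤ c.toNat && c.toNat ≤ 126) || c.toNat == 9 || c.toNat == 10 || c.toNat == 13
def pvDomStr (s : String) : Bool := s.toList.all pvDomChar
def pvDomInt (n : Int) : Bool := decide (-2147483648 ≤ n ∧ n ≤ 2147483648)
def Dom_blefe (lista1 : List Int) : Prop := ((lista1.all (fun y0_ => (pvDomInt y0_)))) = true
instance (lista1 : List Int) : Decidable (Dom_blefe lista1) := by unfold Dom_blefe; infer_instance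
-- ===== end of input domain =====

-- B replaces A's single clamping index loop by an explicit prefix-minimum table plus a
-- separate differences pass (alternative decomposition, same cost); A mutates lista1 in
-- place and the equivalence proved here is about the RETURN value only (Python B performs
-- the same mutation).


-- ===== PORT A =====
-- loop body of A: state = (lista, current contents of lista1); indices are always in
-- range, so .getD 0 never takes its default
def blefeStep (st : List Int × List Int) (valor : Int) : List Int × List Int :=
  let lista := st.1
  let l1 := st.2
  if valor ≠ 0 then
    let cur := (PySem.List.pyGet? l1 valor).getD 0
    let prev := (PySem.List.pyGet? l1 (valor - 1)).getD 0
    if cur > prev then (lista ++ [cur - prev], l1.set valor.toNat prev)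
    else (lista ++ [0], l1)
  else (lista ++ [0], l1)

def blefe (lista1 : List Int) : List Int :=
  ((PySem.List.pyRange 0 (lista1.length : Int) 1).foldl blefeStep ([], lista1)).1

-- ===== PORT B =====
-- pass-1 loop body of B: state = (m, runmin)
def runminStep (st : Int × List Int) (v : Int) : Int × List Int :=
  let m := min st.1 v
  (m, st.2 ++ [m])

def blefe_alt (lista1 : List Int) : List Int :=
  match lista1 with
  | [] => []
  | x :: _ =>
    let runmin := (lista1.foldl runminStep (x, [])).2
    [0] ++ (PySem.List.pyRange 1 (lista1.length : Int) 1).map (fun i =>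
      max 0 ((PySem.List.pyGet? lista1 i).getD 0 -
             (PySem.List.pyGet? runmin (i - 1)).getD 0))

-- ===== PRECONDITION & SPEC =====
def Spec_blefe (lista1 : List Int) (out : List Int) : Prop := out = blefe_alt lista1
instance (lista1 : List Int) (out : List Int) : Decidable (Spec_blefe lista1 out) := by unfold Spec_blefe; infer_instance

-- ===== CLAIM (what is proved, stated in full; the proofs are below) =====
def Claim_equal_blefe : Prop := ∀ (lista1 : List Int), Dom_blefe lista1 → Spec_blefe lista1 (blefe lista1)

-- ===== LEMMAS AND PROOFS =====
-- the common value both programs compute: element i of the tail is max 0 (vᵢ − min of the earlier prefix)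
def specOut (m : Int) : List Int → List Int
  | [] => []
  | v :: r => max 0 (v - m) :: specOut (min m v) r

-- the prefix-min clamped list tail (A's final lista1 contents / B's runmin tail)
def clampTail (m : Int) : List Int → List Int
  | [] => []
  | v :: r => min m v :: clampTail (min m v) r

theorem pyGet_append_len (p rest : List Int) (v : Int) (h : rest.headI = v) (hne : rest ≠ []) :
    (PySem.List.pyGet? (p ++ rest) (p.length : Int)).getD 0 = v := by
  cases rest with
  | nil => simp at hne
  | cons a r => simp_all [List.getElem?_append_right]

theorem pyGet_append_mid (q t : List Int) (m : Int) :
    (PySem.List.pyGet? (q ++ [m] ++ t) (q.length : Int)).getD 0 = m := by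
  simp [List.getElem?_append_left]

theorem A_inv (rest : List Int) : ∀ (q : List Int) (m : Int) (acc : List Int),
    (PySem.List.pyRange ((q.length : Int) + 1) ((q.length : Int) + 1 + rest.length) 1).foldl
      blefeStep (acc, q ++ [m] ++ rest)
    = (acc ++ specOut m rest, q ++ [m] ++ clampTail m rest) := by
  induction rest with
  | nil =>
    intro q m acc
    simp [specOut, clampTail, PySem.List.pyRange]
  | cons v r ih =>
    intro q m acc
    have hlt : ((q.length : Int) + 1) < (q.length : Int) + 1 + (v :: r).length := by
      simp
    rw [PySem.List.pyRange_one_cons hlt]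
    have hcur : (PySem.List.pyGet? (q ++ [m] ++ v :: r) ((q.length : Int) + 1)).getD 0 = v := by
      have := pyGet_append_len (q ++ [m]) (v :: r) v rfl (by simp)
      simpa using this
    have hprev : (PySem.List.pyGet? (q ++ [m] ++ v :: r) ((q.length : Int) + 1 - 1)).getD 0 = m := by
      simpa using pyGet_append_mid q (v :: r) m
    have he : ((q.length : Int) + 1 + ((v :: r).length : Int)) = ((q.length : Int) + 1) + 1 + (r.length : Int) := by
      simp; ring
    have h2 : (((q ++ [m]).length : Int)) = (q.length : Int) + 1 := by simp
    by_cases hvm : v > m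
    · have hstep : blefeStep (acc, q ++ [m] ++ v :: r) ((q.length : Int) + 1)
          = (acc ++ [v - m], (q ++ [m]) ++ [m] ++ r) := by
        simp only [blefeStep, hcur, hprev]
        rw [if_pos (show ((q.length : Int) + 1) ≠ 0 by omega), if_pos hvm]
        have ht : ((q.length : Int) + 1).toNat = (q ++ [m]).length := by simp
        rw [ht]
        have hset : ((q ++ [m]) ++ v :: r).set (q ++ [m]).length m = (q ++ [m]) ++ m :: r := by
          simp
        simp only [List.append_assoc] at hset ⊢
        rw [hset]
        simp
      rw [List.foldl_cons, hstep, he]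
      have hih := ih (q ++ [m]) m (acc ++ [v - m])
      rw [h2] at hih
      rw [hih]
      simp only [specOut, clampTail, min_eq_left (le_of_lt hvm),
        max_eq_right (by omega : (0 : Int) ≤ v - m)]
      simp
    · have hstep : blefeStep (acc, q ++ [m] ++ v :: r) ((q.length : Int) + 1)
          = (acc ++ [0], (q ++ [m]) ++ [v] ++ r) := by
        simp only [blefeStep, hcur, hprev]
        rw [if_pos (show ((q.length : Int) + 1) ≠ 0 by omega), if_neg hvm]
        simp
      rw [List.foldl_cons, hstep, he]
      have hih := ih (q ++ [m]) v (acc ++ [0])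
      rw [h2] at hih
      rw [hih]
      simp only [specOut, clampTail, min_eq_right (by omega : v ≤ m),
        max_eq_left (by omega : v - m ≤ (0 : Int))]
      simp

theorem R_inv (xs : List Int) : ∀ (m : Int) (acc : List Int),
    (xs.foldl runminStep (m, acc)).2 = acc ++ clampTail m xs := by
  induction xs with
  | nil => intro m acc; simp [clampTail]
  | cons v r ih =>
    intro m acc
    simp only [List.foldl_cons, runminStep, clampTail]
    rw [ih]
    simp

theorem B_inv (rest : List Int) : ∀ (p q : List Int) (m : Int), p.length = q.length + 1 →
    (PySem.List.pyRange ((q.length : Int) + 1) ((q.length : Int) + 1 + rest.length) 1).map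
      (fun i => max 0 ((PySem.List.pyGet? (p ++ rest) i).getD 0 -
                       (PySem.List.pyGet? (q ++ [m] ++ clampTail m rest) (i - 1)).getD 0))
    = specOut m rest := by
  induction rest with
  | nil => intro p q m hpq; simp [specOut, PySem.List.pyRange]
  | cons v r ih =>
    intro p q m hpq
    have hlt : ((q.length : Int) + 1) < (q.length : Int) + 1 + (v :: r).length := by simp
    rw [PySem.List.pyRange_one_cons hlt]
    rw [List.map_cons]
    have hp : ((q.length : Int) + 1) = (p.length : Int) := by omega
    have hcur : (PySem.List.pyGet? (p ++ v :: r) ((q.length : Int) + 1)).getD 0 = v := by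
      rw [hp]; exact pyGet_append_len p (v :: r) v rfl (by simp)
    have hprev : (PySem.List.pyGet? (q ++ [m] ++ clampTail m (v :: r)) ((q.length : Int) + 1 - 1)).getD 0 = m := by
      simpa using pyGet_append_mid q (clampTail m (v :: r)) m
    rw [hcur, hprev]
    have he : ((q.length : Int) + 1 + ((v :: r).length : Int)) = ((q.length : Int) + 1) + 1 + (r.length : Int) := by
      simp; ring
    rw [he]
    have h2 : (((q ++ [m]).length : Int)) = (q.length : Int) + 1 := by simp
    have hih := ih (p ++ [v]) (q ++ [m]) (min m v) (by simp [hpq])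
    rw [h2] at hih
    simp only [specOut, clampTail]
    rw [← hih]
    congr 1
    simp only [List.append_assoc, List.singleton_append, List.cons_append, List.nil_append]

theorem blefe_eq (x : Int) (xs : List Int) : blefe (x :: xs) = 0 :: specOut x xs := by
  unfold blefe
  have h0 : (0 : Int) < ((x :: xs).length : Int) := by simp
  rw [PySem.List.pyRange_one_cons h0, List.foldl_cons]
  have hstep : blefeStep (([] : List Int), x :: xs) 0 = ([0], x :: xs) := by
    simp [blefeStep]
  rw [hstep]
  have := A_inv xs [] x [0]
  simp only [List.length_nil, Nat.cast_zero, zero_add, List.nil_append, List.singleton_append] at this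
  have he : (((x :: xs).length : Int)) = 1 + (xs.length : Int) := by simp; ring
  rw [he]
  norm_num
  rw [this]

theorem blefe_alt_eq (x : Int) (xs : List Int) : blefe_alt (x :: xs) = 0 :: specOut x xs := by
  unfold blefe_alt
  simp only []
  have hr : ((x :: xs).foldl runminStep (x, [])).2 = x :: clampTail x xs := by
    rw [List.foldl_cons]
    have : runminStep (x, ([] : List Int)) x = (x, [x]) := by simp [runminStep]
    rw [this, R_inv]
    simp
  rw [hr]
  have := B_inv xs [x] [] x (by simp)
  simp only [List.length_nil, Nat.cast_zero, zero_add, List.nil_append, List.singleton_append] at this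
  have he : (((x :: xs).length : Int)) = 1 + (xs.length : Int) := by simp; ring
  rw [he, this]
  simp

-- ===== VERDICT (by name: the statement is the Claim_ definition above) =====
theorem blefe_spec : Claim_equal_blefe := by
  intro lista1 _
  unfold Spec_blefe
  cases lista1 with
  | nil => rfl
  | cons x xs => rw [blefe_eq, blefe_alt_eq]
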